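-- pv_equiv track=rewrite | github.com/K-J-HYEON/pythonCodingTest | new/programmers/lv2/MatrixMultiplication.py | solution
-- ===== SOURCE A (Python) =====
-- def solution(arr1, arr2):
--     R1, C1 = len(arr1), len(arr1[0])
--     R2, C2 = len(arr2), len(arr2[0])
--
--     answer = []
--     for ans_r in range(R1):
--         line = []
--         for ans_c in range(C2):
--             mul_val = 0
--             for mul_idx in range(C1):
--                 mul_val += arr1[ans_r][mul_idx] + arr2[mul_idx][ans_c]
--             line.append(mul_val)
--         answer.append(line)
--     return answer
-- ===== SOURCE B (Python) =====
-- def solution(arr1, arr2):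
--     C1 = len(arr1[0])
--     C2 = len(arr2[0])
--     row_sums = [sum(row[:C1]) for row in arr1]
--     col_sums = [sum(arr2[i][c] for i in range(C1)) for c in range(C2)]
--     return [[r + c for c in col_sums] for r in row_sums]
-- ===== Notes on version B (the rewrite author's own statement) =====
-- stated objective: faster
-- what changed: Precomputes the row sums of arr1 and the column sums of arr2 once, then fills each output cell with one addition, removing A's inner summation loop per cell.
import Mathlib
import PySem

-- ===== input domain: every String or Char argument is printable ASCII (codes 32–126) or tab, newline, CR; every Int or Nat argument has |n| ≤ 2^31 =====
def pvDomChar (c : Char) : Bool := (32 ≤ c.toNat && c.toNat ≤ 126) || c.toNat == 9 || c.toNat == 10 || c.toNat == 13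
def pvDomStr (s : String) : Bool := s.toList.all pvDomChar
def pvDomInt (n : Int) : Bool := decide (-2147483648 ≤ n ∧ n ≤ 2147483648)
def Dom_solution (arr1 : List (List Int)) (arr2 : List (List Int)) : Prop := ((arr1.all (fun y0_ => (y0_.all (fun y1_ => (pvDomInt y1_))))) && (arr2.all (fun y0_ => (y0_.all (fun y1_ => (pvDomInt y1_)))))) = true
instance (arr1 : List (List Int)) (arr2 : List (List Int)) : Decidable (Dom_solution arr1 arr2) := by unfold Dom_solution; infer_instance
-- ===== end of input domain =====

-- B precomputes arr1's row sums and arr2's column sums once and fills each cell with one addition (asymptotically faster than A's per-cell inner loop).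


-- ===== PORT A =====
-- literal transliteration: three nested loops, list append / accumulator add as foldl
def solution (arr1 : List (List Int)) (arr2 : List (List Int)) : List (List Int) :=
  let R1 : Nat := arr1.length
  let C1 : Nat := (arr1.headD []).length
  let C2 : Nat := (arr2.headD []).length
  (PySem.List.pyRange 0 (R1 : Int) 1).foldl (fun answer ans_r =>
    answer ++ [(PySem.List.pyRange 0 (C2 : Int) 1).foldl (fun line ans_c =>
      line ++ [(PySem.List.pyRange 0 (C1 : Int) 1).foldl (fun mul_val mul_idx =>
        mul_val + (PySem.List.pyGetD (PySem.List.pyGetD arr1 ans_r []) mul_idx 0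
                   + PySem.List.pyGetD (PySem.List.pyGetD arr2 mul_idx []) ans_c 0)) 0]) []]) []

-- ===== PORT B =====
-- literal transliteration of Source B: row sums, column sums, then one addition per cell
def solution_alt (arr1 : List (List Int)) (arr2 : List (List Int)) : List (List Int) :=
  let C1 : Nat := (arr1.headD []).length
  let C2 : Nat := (arr2.headD []).length
  let rowSums : List Int := arr1.map (fun row => (PySem.List.slice row none (some (C1 : Int))).sum)
  let colSums : List Int :=
    (PySem.List.pyRange 0 (C2 : Int) 1).map (fun c =>
      ((PySem.List.pyRange 0 (C1 : Int) 1).map (fun i =>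
        PySem.List.pyGetD (PySem.List.pyGetD arr2 i []) c 0)).sum)
  rowSums.map (fun r => colSums.map (fun c => r + c))

-- ===== PRECONDITION & SPEC =====
-- Pre_ excludes exactly the inputs where Python A raises IndexError: empty arr1/arr2 (arr[0]),
-- and — when both C1 > 0 and C2 > 0, so the inner loops actually index — an arr1 row shorter
-- than C1, fewer than C1 rows in arr2, or one of arr2's first C1 rows shorter than C2.
def Pre_solution (arr1 : List (List Int)) (arr2 : List (List Int)) : Prop :=
  arr1 ≠ [] ∧ arr2 ≠ [] ∧
  ((arr1.headD []).length = 0 ∨ (arr2.headD []).length = 0 ∨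
    (arr1.all (fun row => (arr1.headD []).length ≤ row.length) ∧
     (arr1.headD []).length ≤ arr2.length ∧
     (arr2.take (arr1.headD []).length).all (fun row => (arr2.headD []).length ≤ row.length)))
instance (arr1 : List (List Int)) (arr2 : List (List Int)) : Decidable (Pre_solution arr1 arr2) := by unfold Pre_solution; infer_instance

def pvWitness_solution : List (List Int) × List (List Int) := ([[1, 2], [3, 4]], [[5, 6], [7, 8]])

def Spec_solution (arr1 : List (List Int)) (arr2 : List (List Int)) (out : List (List Int)) : Prop := out = solution_alt arr1 arr2
instance (arr1 : List (List Int)) (arr2 : List (List Int)) (out : List (List Int)) : Decidable (Spec_solution arr1 arr2 out) := by unfold Spec_solution; infer_instance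

-- ===== CLAIM (what is proved, stated in full; the proofs are below) =====
def Claim_equal_solution : Prop := ∀ (arr1 : List (List Int)) (arr2 : List (List Int)), Dom_solution arr1 arr2 → Pre_solution arr1 arr2 → Spec_solution arr1 arr2 (solution arr1 arr2)

-- ===== LEMMAS AND PROOFS =====
-- summing the first n Python-indexed entries (default 0 past the end) is summing the first n taken entries
theorem sum_range_pyGetD (row : List Int) (n : Nat) :
    ((List.range n).map (fun k => row.getD k 0)).sum = (row.take n).sum := by
  induction n with
  | zero => simp
  | succ m ih =>
    rw [List.range_succ, List.map_append, List.sum_append, ih]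
    by_cases h : m < row.length
    · simp [List.getD, List.getElem?_eq_getElem h, List.sum_take_succ _ _ h]
    · have h' : row.length ≤ m := by omega
      simp [List.take_of_length_le h', List.take_of_length_le (by omega : row.length ≤ m + 1),
            List.getD, List.getElem?_eq_none_iff.2 h']

-- mapping over indices of xs is mapping over xs
theorem map_range_getD {α β : Type} (xs : List α) (d : α) (f : α → β) :
    (List.range xs.length).map (fun k => f (xs.getD k d)) = xs.map f := by
  apply List.ext_getElem
  · simp
  · intro i h1 h2
    simp at h1 ⊢
    rw [List.getElem?_eq_getElem (by simpa using h1)]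
    simp

-- the two ports agree on every input (the Lean ports are total; Pre_ only marks where Python A raises)
theorem solution_eq_alt (arr1 arr2 : List (List Int)) : solution arr1 arr2 = solution_alt arr1 arr2 := by
  unfold solution solution_alt
  simp only [PySem.List.foldl_append_singleton_eq_map, PySem.List.foldl_add, List.nil_append,
    zero_add, PySem.List.pyRange_zero_natCast, List.map_map, Function.comp_def,
    PySem.List.pyGetD_natCast, PySem.List.slice_to_natCast, PySem.List.sum_map_add_int,
    sum_range_pyGetD]
  exact (map_range_getD arr1 ([] : List Int)
    (fun row => (List.range (arr2.headD []).length).map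
      (fun c => (row.take (arr1.headD []).length).sum +
        ((List.range (arr1.headD []).length).map
          (fun k => (arr2.getD k []).getD c 0)).sum)))

-- ===== VERDICT (by name: the statement is the Claim_ definition above) =====
theorem solution_spec : Claim_equal_solution := by
  intro arr1 arr2 _ _
  unfold Spec_solution
  exact solution_eq_alt arr1 arr2
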